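-- pv_equiv track=rewrite | github.com/foresense/evolver_tool | evolver.py | pack_ms_bit
-- ===== SOURCE A (Python) =====
-- def pack_ms_bit(data: list) -> tuple:
--     packed_data = []
--     count = 0
--     for n, byte in enumerate(data):
--         count, cycle = divmod(n, 7)
--         ms_bit = byte >> 7
--         # growing from 7 bytes to 8 bytes per cycle
--         ms_bits_index = n + count - cycle
--         if cycle == 0:
--             # cycle starts with ms_bit_byte is 8th byte
--             packed_data.append(ms_bit)
--             packed_data.append(byte & 0x7F)
--         else:
--             packed_data.append(byte & 0x7F)
--             packed_data[ms_bits_index] = packed_data[ms_bits_index] | (ms_bit << cycle)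
--     return tuple(packed_data)
-- ===== SOURCE B (Python) =====
-- def pack_ms_bit(data: list) -> tuple:
--     out = []
--     for i in range(0, len(data), 7):
--         chunk = data[i:i + 7]
--         ms = 0
--         for j, b in enumerate(chunk):
--             ms |= (b >> 7) << j
--         out.append(ms)
--         out.extend(b & 0x7F for b in chunk)
--     return tuple(out)
-- ===== Notes on version B (the rewrite author's own statement) =====
-- stated objective: simpler
-- what changed: Replaces A's flat enumerate loop with divmod bookkeeping and in-place OR-mutation of an earlier list slot by a chunked pass that takes 7 bytes at a time, computes the MS-bits byte up front, and emits each 8-byte block directly.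
import Mathlib
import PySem

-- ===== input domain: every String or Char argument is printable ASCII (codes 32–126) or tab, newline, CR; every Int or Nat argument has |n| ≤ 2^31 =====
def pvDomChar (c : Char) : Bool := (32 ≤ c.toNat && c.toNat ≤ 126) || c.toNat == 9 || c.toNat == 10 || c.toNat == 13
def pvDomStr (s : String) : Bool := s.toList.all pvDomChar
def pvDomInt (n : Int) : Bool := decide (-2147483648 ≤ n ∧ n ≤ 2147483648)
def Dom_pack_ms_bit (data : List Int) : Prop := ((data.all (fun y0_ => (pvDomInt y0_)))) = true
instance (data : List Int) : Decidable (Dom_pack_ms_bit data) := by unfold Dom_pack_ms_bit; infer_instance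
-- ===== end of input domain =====

-- B replaces A's flat enumerate-with-modular-index-and-in-place-OR by a grouped pass over
-- 7-byte chunks that builds each 8-byte output block directly (objective: simpler).

-- ===== PORT A =====
-- A's for-loop over enumerate(data) with the mutable packed_data list and count/cycle from divmod.
def packLoopA : List Int → Nat → List Int → List Int
  | [], _, acc => acc
  | b :: rest, n, acc =>
    let count := n / 7
    let cycle := n % 7
    let msBit := b >>> 7
    let idx := n + count - cycle   -- ms_bits_index; all quantities nonnegative, so Nat subtraction = Python's
    if cycle = 0 then
      packLoopA rest (n + 1) (acc ++ [msBit, PySem.Int.band b 127])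
    else
      let acc' := acc ++ [PySem.Int.band b 127]
      packLoopA rest (n + 1) (acc'.set idx (PySem.Int.bor (acc'.getD idx 0) (msBit <<< cycle)))

def pack_ms_bit (data : List Int) : List Int := packLoopA data 0 []

-- ===== PORT B =====
-- B's loop 'for i in range(0, len(data), 7)' with chunk = data[i:i+7], as the obvious chunk recursion.
def packChunksB : List Int → List Int
  | [] => []
  | b :: t =>
    let chunk := b :: t.take 6               -- data[i:i+7]
    let ms := chunk.zipIdx.foldl (fun (m : Int) (p : Int × Nat) => PySem.Int.bor m ((p.1 >>> 7) <<< p.2)) 0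
    ms :: (chunk.map (fun x => PySem.Int.band x 127) ++ packChunksB (t.drop 6))
termination_by l => l.length
decreasing_by simp

def pack_ms_bit_alt (data : List Int) : List Int := packChunksB data

-- ===== PRECONDITION & SPEC =====
def Spec_pack_ms_bit (data : List Int) (out : List Int) : Prop := out = pack_ms_bit_alt data
instance (data : List Int) (out : List Int) : Decidable (Spec_pack_ms_bit data out) := by unfold Spec_pack_ms_bit; infer_instance

-- ===== CLAIM (what is proved, stated in full; the proofs are below) =====
def Claim_equal_pack_ms_bit : Prop := ∀ (data : List Int), Dom_pack_ms_bit data → Spec_pack_ms_bit data (pack_ms_bit data)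

-- ===== LEMMAS AND PROOFS =====

/-- The MS-bits byte accumulated over a chunk, with `j` the position of the first element. -/
def msAcc : Nat → Int → List Int → Int
  | _, m, [] => m
  | j, m, b :: t => msAcc (j + 1) (PySem.Int.bor m ((b >>> 7) <<< j)) t

lemma zipIdx_foldl_msAcc (cs : List Int) : ∀ (j : Nat) (m : Int),
    (cs.zipIdx j).foldl (fun (m : Int) (p : Int × Nat) => PySem.Int.bor m ((p.1 >>> 7) <<< p.2)) m = msAcc j m cs := by
  induction cs with
  | nil => intro j m; rfl
  | cons b t ih => intro j m; simp only [List.zipIdx_cons, List.foldl_cons, msAcc]; exact ih (j + 1) _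

lemma bor_zero_left (x : Int) : PySem.Int.bor 0 x = x := by
  simp [PySem.Int.bor]; omega

/-- One chunk of A's loop, element by element, starting `j ≥ 1` elements into the cycle. -/
lemma innerA (cs : List Int) : ∀ (rest : List Int) (k j : Nat) (base lows : List Int) (ms : Int),
    base.length = 8 * k → lows.length = j → 1 ≤ j → j + cs.length ≤ 7 →
    packLoopA (cs ++ rest) (7 * k + j) (base ++ ms :: lows)
      = packLoopA rest (7 * k + j + cs.length)
          (base ++ msAcc j ms cs :: (lows ++ cs.map (fun x => PySem.Int.band x 127))) := by
  induction cs with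
  | nil => intro rest k j base lows ms _ _ _ _; simp [msAcc]
  | cons b cs' ih =>
    intro rest k j base lows ms hbase hlows hj1 hj7
    have hjlt : j < 7 := by simp at hj7; omega
    have hcyc : (7 * k + j) % 7 = j := by omega
    have hcnt : (7 * k + j) / 7 = k := by omega
    have hidx : 7 * k + j + k - j = base.length := by omega
    simp only [List.cons_append, packLoopA]
    rw [hcyc, hcnt, if_neg (by omega)]
    have hset : ∀ (v : Int),
        ((base ++ ms :: lows) ++ [v]).set base.length
            (PySem.Int.bor (((base ++ ms :: lows) ++ [v]).getD base.length 0) ((b >>> 7) <<< j))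
          = base ++ (PySem.Int.bor ms ((b >>> 7) <<< j)) :: (lows ++ [v]) := by
      intro v
      rw [List.append_cons base ms, List.append_assoc, List.append_assoc]
      rw [List.getD_eq_getElem?_getD, List.getElem?_append_right (by simp),
          List.set_append_right _ _ (by simp)]
      simp
    rw [hidx, hset]
    have := ih rest k (j + 1) base (lows ++ [PySem.Int.band b 127])
      (PySem.Int.bor ms ((b >>> 7) <<< j))
      hbase (by simp [hlows]) (by omega) (by simp at hj7 ⊢; omega)
    rw [show 7 * k + j + 1 = 7 * k + (j + 1) by omega, this]
    simp only [msAcc, List.map_cons, List.length_cons, List.append_assoc, List.singleton_append]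
    congr 1
    omega

lemma packChunksB_nil : packChunksB [] = [] := by rw [packChunksB]

/-- A's loop, starting at a chunk boundary over residual data, equals B's chunk recursion. -/
lemma mainLemma : ∀ (N : Nat) (data : List Int) (k : Nat) (base : List Int),
    data.length ≤ N → base.length = 8 * k →
    packLoopA data (7 * k) base = base ++ packChunksB data := by
  intro N
  induction N with
  | zero =>
    intro data k base hN hbase
    have : data = [] := by cases data <;> simp_all
    subst this; rw [packLoopA, packChunksB]; simp
  | succ N ih =>
    intro data k base hN hbase
    cases data with
    | nil => rw [packLoopA, packChunksB]; simp
    | cons b t =>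
      simp only [packLoopA]
      rw [show (7 * k) % 7 = 0 by omega, if_pos rfl]
      have hsplit : t = t.take 6 ++ t.drop 6 := (List.take_append_drop 6 t).symm
      have happ : base ++ [b >>> 7, PySem.Int.band b 127]
          = base ++ (b >>> 7) :: [PySem.Int.band b 127] := rfl
      rw [show 7 * k + 1 = 7 * k + 1 by rfl]
      conv_lhs => rw [hsplit, happ]
      rw [innerA (t.take 6) (t.drop 6) k 1 base [PySem.Int.band b 127] (b >>> 7)
            hbase rfl le_rfl (by have := List.length_take_le 6 t; omega)]
      have hms : msAcc 0 0 (b :: t.take 6) = msAcc 1 (b >>> 7) (t.take 6) := by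
        simp [msAcc, bor_zero_left]
      have hrhs : packChunksB (b :: t)
          = msAcc 1 (b >>> 7) (t.take 6)
              :: ((PySem.Int.band b 127 :: (t.take 6).map (fun x => PySem.Int.band x 127))
                  ++ packChunksB (t.drop 6)) := by
        rw [packChunksB]
        simp only [zipIdx_foldl_msAcc, hms, List.map_cons]
      cases hd : t.drop 6 with
      | nil =>
        simp only [packLoopA, hrhs, hd, packChunksB_nil]
        simp
      | cons r rs =>
        have hlen6 : 6 < t.length := by
          by_contra h
          rw [List.drop_eq_nil_of_le (by omega : t.length ≤ 6)] at hd
          simp at hd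
        rw [← hd]
        have htake : (t.take 6).length = 6 := by simp; omega
        rw [htake, show 7 * k + 1 + 6 = 7 * (k + 1) by omega]
        rw [ih (t.drop 6) (k + 1)
              (base ++ msAcc 1 (b >>> 7) (t.take 6)
                :: ([PySem.Int.band b 127] ++ (t.take 6).map (fun x => PySem.Int.band x 127)))
              (by simp at hN ⊢; omega)
              (by simp [hbase]; omega)]
        rw [hrhs]
        simp [List.append_assoc]

-- ===== VERDICT (by name: the statement is the Claim_ definition above) =====
theorem pack_ms_bit_spec : Claim_equal_pack_ms_bit := by
  intro data _
  unfold Spec_pack_ms_bit pack_ms_bit pack_ms_bit_alt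
  have := mainLemma data.length data 0 [] le_rfl (by simp)
  simpa using this
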